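-- pv_equiv track=rewrite | github.com/katerindelahoz/Inference-of-unate-Boolean-functions | scr/coverage.py | arrangediscrepances
-- ===== SOURCE A (Python) =====
-- def countline(D, l, Snong, n):
--     """Size of the support of discrepancy l restricted to unassigned coordinates."""
--     count = 0
--     for k in range(n):
--         if Snong[k] == "0" and D[l][k] != "0":
--             count += 1
--     return count
--
-- def arrangediscrepances(D, deletedlinesNONGLOBAL, Snong, n):
--     """Bucket discrepancies by increasing weight among the not-covered ones."""
--     d = len(D)
--     WW = [[] for _ in range(n + 1)]
--     for q in range(d):
--         if q not in deletedlinesNONGLOBAL: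
--             wx = countline(D, q, Snong, n)
--             WW[wx].append(q)
--     return WW
-- ===== SOURCE B (Python) =====
-- def arrangediscrepances(D, deletedlinesNONGLOBAL, Snong, n):
--     """Column-major: precompute the surviving rows, accumulate all their
--     restricted weights at once per '0'-column, then bucket in a second pass."""
--     live = [q for q in range(len(D)) if q not in deletedlinesNONGLOBAL]
--     counts = [0] * len(D)
--     for k, ch in enumerate(Snong[:n]):
--         if ch == '0':
--             for q in live:
--                 if D[q][k] != '0':
--                     counts[q] += 1
--     WW = [[] for _ in range(n + 1)]
--     for q in live:
--         WW[counts[q]].append(q)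
--     return WW
-- ===== Notes on version B (the rewrite author's own statement) =====
-- stated objective: alternative
-- what changed: Instead of computing each surviving row's restricted weight on demand inside one bucketing loop, B precomputes the list of surviving rows, accumulates all their weights simultaneously in a column-major pass over the '0'-columns of Snong, and then buckets the rows in a separate second pass.
import Mathlib
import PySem

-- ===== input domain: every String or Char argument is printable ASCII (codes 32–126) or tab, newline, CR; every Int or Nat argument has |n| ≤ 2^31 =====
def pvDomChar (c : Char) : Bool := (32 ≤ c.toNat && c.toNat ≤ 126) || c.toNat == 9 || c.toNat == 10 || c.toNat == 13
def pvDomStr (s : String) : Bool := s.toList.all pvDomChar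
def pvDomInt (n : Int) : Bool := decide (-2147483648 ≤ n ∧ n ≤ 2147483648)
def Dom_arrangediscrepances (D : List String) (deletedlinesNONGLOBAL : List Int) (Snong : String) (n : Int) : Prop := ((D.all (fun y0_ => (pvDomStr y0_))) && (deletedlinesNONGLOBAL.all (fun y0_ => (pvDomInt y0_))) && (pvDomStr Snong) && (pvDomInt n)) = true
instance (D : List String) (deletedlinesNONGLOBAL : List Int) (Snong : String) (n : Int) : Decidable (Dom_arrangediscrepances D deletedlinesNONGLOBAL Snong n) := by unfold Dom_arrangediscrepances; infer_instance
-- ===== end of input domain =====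

-- B replaces A's on-demand per-row weight computation by a precomputed list of surviving rows,
-- a column-major accumulation of all their weights at once, and a separate bucketing pass
-- (objective: alternative decomposition, same cost).

-- s[k] totalized (under Pre_ every index either program uses is in range)
def pvChr (s : String) (k : Int) : Char := (PySem.Str.pyGet? s k).getD ' '

-- WW[i].append(x); under Pre_ the index is always in range
def bucketApp (WW : List (List Int)) (i : Int) (x : Int) : List (List Int) :=
  if h : 0 ≤ i ∧ i.toNat < WW.length then WW.set i.toNat (WW[i.toNat]'h.2 ++ [x]) else WW

-- counts[q] += 1; under Pre_ the index is always in range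
def listIncr (cs : List Int) (q : Int) : List Int :=
  if h : 0 ≤ q ∧ q.toNat < cs.length then cs.set q.toNat (cs[q.toNat]'h.2 + 1) else cs

-- ===== PORT A =====
def countline (D : List String) (l : Int) (Snong : String) (n : Int) : Int :=
  (PySem.List.pyRange 0 n 1).foldl (fun count k =>
    if pvChr Snong k = '0' ∧ pvChr ((PySem.List.pyGet? D l).getD "") k ≠ '0' then count + 1 else count) 0

def arrangediscrepances (D : List String) (deletedlinesNONGLOBAL : List Int) (Snong : String) (n : Int) : List (List Int) :=
  let d : Int := D.length
  let WW : List (List Int) := List.replicate (n + 1).toNat []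
  (PySem.List.pyRange 0 d 1).foldl (fun WW q =>
    if q ∈ deletedlinesNONGLOBAL then WW
    else
      let wx := countline D q Snong n
      bucketApp WW wx q) WW

-- ===== PORT B =====
def arrangediscrepances_alt (D : List String) (deletedlinesNONGLOBAL : List Int) (Snong : String) (n : Int) : List (List Int) :=
  let live : List Int := (PySem.List.pyRange 0 (D.length : Int) 1).filter (fun q => decide (q ∉ deletedlinesNONGLOBAL))
  let counts : List Int :=
    (PySem.List.enumerate (PySem.Str.slice Snong none (some n)).toList 0).foldl
      (fun cs kc =>
        if kc.2 = '0' then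
          live.foldl (fun cs q =>
            if pvChr ((PySem.List.pyGet? D q).getD "") kc.1 ≠ '0' then listIncr cs q else cs) cs
        else cs)
      (List.replicate D.length 0)
  let WW : List (List Int) := List.replicate (n + 1).toNat []
  live.foldl (fun WW q => bucketApp WW (counts.getD q.toNat 0) q) WW

-- ===== PRECONDITION & SPEC =====
-- Pre_ holds exactly on the inputs where Python A returns (raises nothing): either every row
-- is deleted (A never indexes anything), or 0 ≤ n ≤ len(Snong) and every surviving row is
-- longer than every column k < n at which Snong[k] = '0'. Nothing A returns on is excluded.
def Pre_arrangediscrepances (D : List String) (deletedlinesNONGLOBAL : List Int) (Snong : String) (n : Int) : Prop :=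
  (∀ q ∈ List.range D.length, (q : Int) ∈ deletedlinesNONGLOBAL) ∨
  (0 ≤ n ∧ n ≤ (Snong.toList.length : Int) ∧
   ∀ k ∈ List.range n.toNat, Snong.toList.getD k ' ' = '0' →
     ∀ q ∈ List.range D.length, (q : Int) ∉ deletedlinesNONGLOBAL → k < (D.getD q "").toList.length)
instance (D : List String) (deletedlinesNONGLOBAL : List Int) (Snong : String) (n : Int) : Decidable (Pre_arrangediscrepances D deletedlinesNONGLOBAL Snong n) := by unfold Pre_arrangediscrepances; infer_instance

def pvWitness_arrangediscrepances : List String × List Int × String × Int := (["10", "01", "11"], [1], "00", 2)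

def Spec_arrangediscrepances (D : List String) (deletedlinesNONGLOBAL : List Int) (Snong : String) (n : Int) (out : List (List Int)) : Prop := out = arrangediscrepances_alt D deletedlinesNONGLOBAL Snong n
instance (D : List String) (deletedlinesNONGLOBAL : List Int) (Snong : String) (n : Int) (out : List (List Int)) : Decidable (Spec_arrangediscrepances D deletedlinesNONGLOBAL Snong n out) := by unfold Spec_arrangediscrepances; infer_instance

-- ===== CLAIM (what is proved, stated in full; the proofs are below) =====
def Claim_equal_arrangediscrepances : Prop := ∀ (D : List String) (deletedlinesNONGLOBAL : List Int) (Snong : String) (n : Int), Dom_arrangediscrepances D deletedlinesNONGLOBAL Snong n → Pre_arrangediscrepances D deletedlinesNONGLOBAL Snong n → Spec_arrangediscrepances D deletedlinesNONGLOBAL Snong n (arrangediscrepances D deletedlinesNONGLOBAL Snong n)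

-- ===== LEMMAS AND PROOFS =====

-- proof-side names for B's two intermediate lists (definitionally B's `let`s)
def pvLive (D : List String) (del : List Int) : List Int :=
  (PySem.List.pyRange 0 (D.length : Int) 1).filter (fun q => decide (q ∉ del))

def pvCounts (D : List String) (del : List Int) (Snong : String) (n : Int) : List Int :=
  (PySem.List.enumerate (PySem.Str.slice Snong none (some n)).toList 0).foldl
    (fun cs kc =>
      if kc.2 = '0' then
        (pvLive D del).foldl (fun cs q =>
          if pvChr ((PySem.List.pyGet? D q).getD "") kc.1 ≠ '0' then listIncr cs q else cs) cs
      else cs)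
    (List.replicate D.length 0)

lemma listIncr_length (cs : List Int) (q : Int) : (listIncr cs q).length = cs.length := by
  unfold listIncr; split <;> simp

lemma listIncr_getD_self (cs : List Int) (q : Int) (h0 : 0 ≤ q) (h : q.toNat < cs.length) :
    (listIncr cs q).getD q.toNat 0 = cs.getD q.toNat 0 + 1 := by
  unfold listIncr
  rw [dif_pos ⟨h0, h⟩]
  rw [List.getD_eq_getElem _ _ (by simpa using h), List.getD_eq_getElem _ _ h]
  simp

lemma listIncr_getD_ne (cs : List Int) (q' q : Int) (hne : q'.toNat ≠ q.toNat) :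
    (listIncr cs q').getD q.toNat 0 = cs.getD q.toNat 0 := by
  unfold listIncr
  split
  · rw [List.getD, List.getD, List.getElem?_set_ne hne]
  · rfl

lemma innerFold_length (P : Int → Prop) [DecidablePred P] (l : List Int) :
    ∀ (cs : List Int), (l.foldl (fun cs q => if P q then listIncr cs q else cs) cs).length = cs.length := by
  induction l with
  | nil => intro cs; rfl
  | cons a t ih =>
    intro cs
    rw [List.foldl_cons, ih]
    split <;> simp [listIncr_length]

lemma innerFold_getD_not_mem (P : Int → Prop) [DecidablePred P] (l : List Int) :
    ∀ (cs : List Int) (q : Int), 0 ≤ q → (∀ x ∈ l, 0 ≤ x) → q ∉ l →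
      (l.foldl (fun cs q => if P q then listIncr cs q else cs) cs).getD q.toNat 0 = cs.getD q.toNat 0 := by
  induction l with
  | nil => intro cs q _ _ _; rfl
  | cons a t ih =>
    intro cs q h0 hl hq
    rw [List.foldl_cons, ih _ q h0 (fun x hx => hl x (List.mem_cons_of_mem _ hx)) (fun h => hq (List.mem_cons_of_mem _ h))]
    have ha : 0 ≤ a := hl a List.mem_cons_self
    have hne : a.toNat ≠ q.toNat := by
      intro h
      apply hq
      have heq : a = q := by omega
      rw [heq]
      exact List.mem_cons_self
    split
    · exact listIncr_getD_ne cs a q hne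
    · rfl

lemma innerFold_getD_mem (P : Int → Prop) [DecidablePred P] (l : List Int) :
    ∀ (cs : List Int) (q : Int), l.Nodup → (∀ x ∈ l, 0 ≤ x) → q ∈ l → q.toNat < cs.length →
      (l.foldl (fun cs q => if P q then listIncr cs q else cs) cs).getD q.toNat 0
        = cs.getD q.toNat 0 + (if P q then 1 else 0) := by
  induction l with
  | nil => intro cs q _ _ hq _; cases hq
  | cons a t ih =>
    intro cs q hnd hl hq hlen
    have ha : 0 ≤ a := hl a List.mem_cons_self
    rcases List.mem_cons.1 hq with rfl | hqt
    · rw [List.foldl_cons,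
        innerFold_getD_not_mem P t _ q ha (fun x hx => hl x (List.mem_cons_of_mem _ hx)) (List.nodup_cons.1 hnd).1]
      by_cases hP : P q
      · rw [if_pos hP, if_pos hP, listIncr_getD_self cs q ha hlen]
      · rw [if_neg hP, if_neg hP, add_zero]
    · have hne : a.toNat ≠ q.toNat := by
        intro h
        have hq0 : 0 ≤ q := hl q hq
        have heq : a = q := by omega
        exact (List.nodup_cons.1 hnd).1 (heq ▸ hqt)
      rw [List.foldl_cons]
      have hlen' : q.toNat < (if P a then listIncr cs a else cs).length := by
        split <;> simp [listIncr_length, hlen]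
      rw [ih _ q (List.nodup_cons.1 hnd).2 (fun x hx => hl x (List.mem_cons_of_mem _ hx)) hqt hlen']
      congr 1
      split
      · exact listIncr_getD_ne cs a q hne
      · rfl

lemma colsFold_getD (D : List String) (live : List Int) (q : Int)
    (hnd : live.Nodup) (hpos : ∀ x ∈ live, 0 ≤ x) (hq : q ∈ live) :
    ∀ (cols : List (Int × Char)) (cs : List Int), q.toNat < cs.length →
      (cols.foldl (fun cs kc =>
        if kc.2 = '0' then
          live.foldl (fun cs q =>
            if pvChr ((PySem.List.pyGet? D q).getD "") kc.1 ≠ '0' then listIncr cs q else cs) cs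
        else cs) cs).getD q.toNat 0
      = cs.getD q.toNat 0 +
        (cols.map (fun kc => if kc.2 = '0' ∧ pvChr ((PySem.List.pyGet? D q).getD "") kc.1 ≠ '0' then (1:Int) else 0)).sum := by
  intro cols
  induction cols with
  | nil => intro cs _; simp
  | cons kc cols ih =>
    intro cs hlen
    rw [List.foldl_cons]
    have hlen' : q.toNat < (if kc.2 = '0' then
        live.foldl (fun cs q =>
          if pvChr ((PySem.List.pyGet? D q).getD "") kc.1 ≠ '0' then listIncr cs q else cs) cs
      else cs).length := by
      split
      · rw [innerFold_length]; exact hlen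
      · exact hlen
    rw [ih _ hlen']
    have hstep : (if kc.2 = '0' then
        live.foldl (fun cs q =>
          if pvChr ((PySem.List.pyGet? D q).getD "") kc.1 ≠ '0' then listIncr cs q else cs) cs
      else cs).getD q.toNat 0
        = cs.getD q.toNat 0 + (if kc.2 = '0' ∧ pvChr ((PySem.List.pyGet? D q).getD "") kc.1 ≠ '0' then (1:Int) else 0) := by
      by_cases hc : kc.2 = '0'
      · rw [if_pos hc, innerFold_getD_mem _ live cs q hnd hpos hq hlen]
        by_cases hd : pvChr ((PySem.List.pyGet? D q).getD "") kc.1 ≠ '0' <;> simp [hc, hd]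
      · simp [hc]
    rw [hstep, List.map_cons, List.sum_cons]
    ring

lemma countline_eq_sum (D : List String) (q : Int) (Snong : String) (n : Int) :
    countline D q Snong n
      = ((PySem.List.pyRange 0 n 1).map (fun k =>
          if pvChr Snong k = '0' ∧ pvChr ((PySem.List.pyGet? D q).getD "") k ≠ '0' then (1:Int) else 0)).sum := by
  unfold countline
  have h1 := PySem.List.foldl_congr_mem (PySem.List.pyRange 0 n 1)
    (fun count k => if pvChr Snong k = '0' ∧ pvChr ((PySem.List.pyGet? D q).getD "") k ≠ '0' then count + 1 else count)
    (fun count k => count + (if pvChr Snong k = '0' ∧ pvChr ((PySem.List.pyGet? D q).getD "") k ≠ '0' then (1:Int) else 0))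
    0 (by intro acc x _; dsimp only; split <;> simp)
  have h2 := PySem.List.foldl_add (PySem.List.pyRange 0 n 1)
    (fun k => if pvChr Snong k = '0' ∧ pvChr ((PySem.List.pyGet? D q).getD "") k ≠ '0' then (1:Int) else 0) 0
  rw [h1, h2, zero_add]

lemma counts_getD_eq (D : List String) (del : List Int) (Snong : String) (n : Int)
    (hn : 0 ≤ n) (hns : n ≤ (Snong.toList.length : Int)) (q : Int) (hq : q ∈ pvLive D del) :
    (pvCounts D del Snong n).getD q.toNat 0 = countline D q Snong n := by
  have hqr : 0 ≤ q ∧ q < (D.length : Int) := by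
    have := (PySem.List.mem_pyRange_one).1 (List.mem_filter.1 hq).1
    omega
  have hnd : (pvLive D del).Nodup := (PySem.List.nodup_pyRange_one 0 (D.length : Int)).filter _
  have hpos : ∀ x ∈ pvLive D del, 0 ≤ x := by
    intro x hx
    have := (PySem.List.mem_pyRange_one).1 (List.mem_filter.1 hx).1
    omega
  unfold pvCounts
  have hqlen : q.toNat < (List.replicate D.length (0:Int)).length := by
    rw [List.length_replicate]; omega
  rw [colsFold_getD D (pvLive D del) q hnd hpos hq _ _ hqlen,
    countline_eq_sum D q Snong n]
  have hslice : (PySem.Str.slice Snong none (some n)).toList = Snong.toList.take n.toNat := by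
    simp [PySem.List.slice_to _ hn]
  rw [hslice, List.getD_replicate, zero_add,
    PySem.List.enumerate_eq_map_pyRange (Snong.toList.take n.toNat) ' ', List.map_map]
  have hlen : ((Snong.toList.take n.toNat).length : Int) = n := by
    rw [List.length_take]; omega
  rw [PySem.List.len_eq, hlen]
  apply congrArg
  apply List.map_congr_left
  intro k hk
  have hkr : 0 ≤ k ∧ k < n := (PySem.List.mem_pyRange_one).1 hk
  have hchr : PySem.List.pyGetD (Snong.toList.take n.toNat) k ' ' = pvChr Snong k := by
    rw [PySem.List.pyGetD_of_nonneg _ _ hkr.1]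
    unfold pvChr
    rw [← Int.toNat_of_nonneg hkr.1, PySem.Str.pyGet?_natCast]
    simp only [Int.toNat_natCast]
    rw [List.getD_eq_getElem?_getD, List.getElem?_take, if_pos (by omega)]
  simp only [Function.comp, hchr]
  omega

lemma main_eq (D : List String) (del : List Int) (Snong : String) (n : Int)
    (hpre : Pre_arrangediscrepances D del Snong n) :
    arrangediscrepances D del Snong n = arrangediscrepances_alt D del Snong n := by
  have hA : arrangediscrepances D del Snong n
      = (PySem.List.pyRange 0 (D.length : Int) 1).foldl (fun WW q =>
          if q ∈ del then WW else bucketApp WW (countline D q Snong n) q)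
          (List.replicate (n + 1).toNat []) := rfl
  have hB : arrangediscrepances_alt D del Snong n
      = (pvLive D del).foldl (fun WW q => bucketApp WW ((pvCounts D del Snong n).getD q.toNat 0) q)
          (List.replicate (n + 1).toNat []) := rfl
  rw [hA, hB]
  rw [PySem.List.foldl_congr_mem _ _
    (fun WW q => if q ∉ del then bucketApp WW (countline D q Snong n) q else WW) _
    (by intro acc x _; by_cases h : x ∈ del <;> simp [h])]
  rw [PySem.List.foldl_ite_eq_foldl_filter]
  apply PySem.List.foldl_congr_mem
  intro acc q hq
  have hq' : q ∈ PySem.List.pyRange 0 (D.length : Int) 1 ∧ q ∉ del := by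
    have := List.mem_filter.1 hq
    exact ⟨this.1, by simpa using this.2⟩
  have hqr : 0 ≤ q ∧ q < (D.length : Int) := by
    have := (PySem.List.mem_pyRange_one).1 hq'.1; omega
  have hpre' : 0 ≤ n ∧ n ≤ (Snong.toList.length : Int) := by
    rcases hpre with h | h
    · exfalso
      have hm : (q.toNat : Int) ∈ del := h q.toNat (by simp; omega)
      rw [Int.toNat_of_nonneg hqr.1] at hm
      exact hq'.2 hm
    · exact ⟨h.1, h.2.1⟩
  rw [counts_getD_eq D del Snong n hpre'.1 hpre'.2 q hq]

-- ===== VERDICT (by name: the statement is the Claim_ definition above) =====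
theorem arrangediscrepances_spec : Claim_equal_arrangediscrepances := by
  intro D del Snong n _ hpre
  exact main_eq D del Snong n hpre
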